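-- pv_equiv track=rewrite | github.com/rllm-team/rllm | examples/llm_annotate/annotation/at_helpers.py | get_closest_label
-- ===== SOURCE A (Python) =====
-- def get_closest_label(input_string, label_names):
--     """
--     Find the label closest to the unrecognized answer in edit distance.
--     """
--
--     min_distance = float('inf')
--     closest_label = None
--
--     for label in label_names:
--         distance = edit_distance(input_string, label)
--         if distance < min_distance:
--             min_distance = distance
--             closest_label = label
--
--     return closest_label
--
-- def edit_distance(s1, s2):
--     if len(s1) > len(s2):
--         s1, s2 = s2, s1
--
--     distances = range(len(s1) + 1)
--     for i2, c2 in enumerate(s2):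
--         distances_ = [i2+1]
--         for i1, c1 in enumerate(s1):
--             if c1 == c2:
--                 distances_.append(distances[i1])
--             else:
--                 distances_.append(1 + min((distances[i1], distances[i1 + 1], distances_[-1])))
--         distances = distances_
--     return distances[-1]
-- ===== SOURCE B (Python) =====
-- def get_closest_label(input_string, label_names):
--     """
--     Find the label closest to the unrecognized answer in edit distance.
--     """
--     best = None
--     closest_label = None
--     for label in label_names:
--         d = edit_distance(input_string, label)
--         if best is None:
--             best = d
--             closest_label = label
--         elif d < best:
--             best = d
--             closest_label = label
--     return closest_label
--
--
-- def edit_distance(s1, s2):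
--     # Top-down memoized recursion on prefix lengths (i, j):
--     # ed(i, j) = Levenshtein distance between s1[:i] and s2[:j].
--     # The memo is keyed by the flat cell number i * (len(s2) + 1) + j.
--     w = len(s2) + 1
--     memo = {}
--     get = memo.get
--
--     def ed(i, j):
--         k = i * w + j
--         hit = get(k)
--         if hit is not None:
--             return hit
--         if i == 0:
--             r = j
--         elif j == 0:
--             r = i
--         elif s1[i - 1] == s2[j - 1]:
--             r = ed(i - 1, j - 1)
--         else:
--             r = 1 + min(ed(i - 1, j - 1), ed(i - 1, j), ed(i, j - 1))
--         memo[k] = r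
--         return r
--
--     return ed(len(s1), len(s2))
-- ===== Notes on version B (the rewrite author's own statement) =====
-- stated objective: alternative
-- what changed: edit_distance is re-expressed as a top-down memoized recursion ed(i, j) over prefix lengths instead of A's iterative rolling-row dynamic programme; the min-scanning outer loop keeps A's first-on-ties and None-on-empty behaviour.
import Mathlib
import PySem

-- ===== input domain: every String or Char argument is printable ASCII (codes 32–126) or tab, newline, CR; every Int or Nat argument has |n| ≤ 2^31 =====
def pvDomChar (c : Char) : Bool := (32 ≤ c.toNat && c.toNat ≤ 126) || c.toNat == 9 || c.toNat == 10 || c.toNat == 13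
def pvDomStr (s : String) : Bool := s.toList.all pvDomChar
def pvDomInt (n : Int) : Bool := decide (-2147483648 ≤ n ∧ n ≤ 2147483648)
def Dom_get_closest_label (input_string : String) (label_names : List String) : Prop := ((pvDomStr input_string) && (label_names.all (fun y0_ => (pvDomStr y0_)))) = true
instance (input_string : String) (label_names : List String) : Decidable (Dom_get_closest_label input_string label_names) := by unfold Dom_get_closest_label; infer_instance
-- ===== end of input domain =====

-- B re-expresses edit_distance as a top-down memoized recursion on prefix lengths instead of A's
-- iterative rolling-row DP (objective: alternative, same asymptotic cost); the outer min-scan is kept.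

-- ===== PORT A =====
-- edit_distance of Source A: rolling-row DP; the swap keeps the shorter string as the row.
-- float('inf') of the outer loop is modeled as 'none' (its only use is the '<' comparison).
def pvEditDistA (s1 s2 : String) : Int :=
  let p := if PySem.Str.len s1 > PySem.Str.len s2 then (s2, s1) else (s1, s2)
  let l1 := p.1.toList
  let l2 := p.2.toList
  let distances : List Int := PySem.List.pyRange 0 ((l1.length : Int) + 1) 1
  let distances := (PySem.List.enumerate l2).foldl (fun distances (ic : Int × Char) =>
    (PySem.List.enumerate l1).foldl (fun ds (jc : Int × Char) =>
      if jc.2 = ic.2 then ds ++ [PySem.List.pyGetD distances jc.1 0]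
      else ds ++ [1 + min (PySem.List.pyGetD distances jc.1 0)
                    (min (PySem.List.pyGetD distances (jc.1 + 1) 0)
                         (PySem.List.pyGetD ds (-1) 0))]) [ic.1 + 1]) distances
  PySem.List.pyGetD distances (-1) 0

def get_closest_label (input_string : String) (label_names : List String) : Option String :=
  let st := label_names.foldl (fun (st : Option Int × Option String) label =>
    let distance := pvEditDistA input_string label
    let lt : Bool := match st.1 with
      | none => true            -- distance < float('inf')
      | some m => distance < m
    if lt then (some distance, some label) else st) (none, none)
  st.2

-- ===== PORT B =====
-- ed(i, j) of Source B: memoized recursion on prefix lengths; 'fuel' only makes the recursion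
-- structurally terminating (fuel > i + j at every call, so it is never exhausted).
-- the memo is keyed by the flat cell number i * (len(s2) + 1) + j, as in Source B
def pvEdB (s1 s2 : List Char) : Nat → Nat → Nat → PySem.Dict Nat Int → Int × PySem.Dict Nat Int
  | 0, _, _, memo => (0, memo)
  | fuel + 1, i, j, memo =>
    match memo.get? (i * (s2.length + 1) + j) with
    | some hit => (hit, memo)
    | none =>
      let rm :=
        if i = 0 then ((j : Int), memo)
        else if j = 0 then ((i : Int), memo)
        else if PySem.List.pyGetD s1 ((i : Int) - 1) ' ' = PySem.List.pyGetD s2 ((j : Int) - 1) ' ' then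
          pvEdB s1 s2 fuel (i - 1) (j - 1) memo
        else
          let am := pvEdB s1 s2 fuel (i - 1) (j - 1) memo
          let bm := pvEdB s1 s2 fuel (i - 1) j am.2
          let cm := pvEdB s1 s2 fuel i (j - 1) bm.2
          (1 + min am.1 (min bm.1 cm.1), cm.2)
      (rm.1, rm.2.insert (i * (s2.length + 1) + j) rm.1)

def pvEditDistB (s1 s2 : String) : Int :=
  let l1 := s1.toList
  let l2 := s2.toList
  (pvEdB l1 l2 (l1.length + l2.length + 1) l1.length l2.length PySem.Dict.empty).1

def get_closest_label_alt (input_string : String) (label_names : List String) : Option String :=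
  let st := label_names.foldl (fun (st : Option Int × Option String) label =>
    let d := pvEditDistB input_string label
    match st.1 with
    | none => (some d, some label)
    | some b => if d < b then (some d, some label) else st) (none, none)
  st.2

-- ===== PRECONDITION & SPEC =====
def Spec_get_closest_label (input_string : String) (label_names : List String) (out : Option String) : Prop := out = get_closest_label_alt input_string label_names
instance (input_string : String) (label_names : List String) (out : Option String) : Decidable (Spec_get_closest_label input_string label_names out) := by unfold Spec_get_closest_label; infer_instance

-- ===== CLAIM (what is proved, stated in full; the proofs are below) =====
def Claim_equal_get_closest_label : Prop := ∀ (input_string : String) (label_names : List String), Dom_get_closest_label input_string label_names → Spec_get_closest_label input_string label_names (get_closest_label input_string label_names)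

-- ===== LEMMAS AND PROOFS =====

-- Reference: Levenshtein distance of the length-i prefix of s and the length-j prefix of t.
def pvLev (s t : List Char) : Nat → Nat → Int
  | 0, j => (j : Int)
  | i + 1, 0 => ((i + 1 : Nat) : Int)
  | i + 1, j + 1 =>
    if s.getD i ' ' = t.getD j ' ' then pvLev s t i j
    else 1 + min (pvLev s t i j) (min (pvLev s t i (j + 1)) (pvLev s t (i + 1) j))

-- pvLev is symmetric in its two strings (strong induction on i + j).
theorem pvLev_comm (s t : List Char) : ∀ N i j, i + j ≤ N → pvLev s t i j = pvLev t s j i := by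
  intro N
  induction N with
  | zero =>
    intro i j h
    obtain ⟨rfl, rfl⟩ : i = 0 ∧ j = 0 := by omega
    simp [pvLev]
  | succ N ih =>
    intro i j h
    match i, j with
    | 0, 0 => simp [pvLev]
    | 0, j + 1 => simp [pvLev]
    | i + 1, 0 => simp [pvLev]
    | i + 1, j + 1 =>
      rw [pvLev, pvLev]
      rw [ih i j (by omega), ih i (j + 1) (by omega), ih (i + 1) j (by omega)]
      split_ifs with h1 h2 h3
      · rfl
      · exact absurd h1.symm h2
      · exact absurd h3.symm h1
      · omega

-- memo invariant: every stored value is the corresponding pvLev value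
def pvMemOK (s t : List Char) (memo : PySem.Dict Nat Int) : Prop :=
  ∀ i j r, j ≤ t.length → memo.get? (i * (t.length + 1) + j) = some r → r = pvLev s t i j

theorem pvEdB_correct (s t : List Char) : ∀ fuel i j memo, i + j < fuel → j ≤ t.length → pvMemOK s t memo →
    (pvEdB s t fuel i j memo).1 = pvLev s t i j ∧ pvMemOK s t (pvEdB s t fuel i j memo).2 := by
  intro fuel
  induction fuel with
  | zero => intro i j memo h; omega
  | succ fuel ih =>
    intro i j memo hf hj hm
    rw [pvEdB]
    cases hget : memo.get? (i * (t.length + 1) + j) with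
    | some hit => exact ⟨hm i j hit hj hget, hm⟩
    | none =>
      have step : ∀ rm : Int × PySem.Dict Nat Int,
          rm.1 = pvLev s t i j → pvMemOK s t rm.2 →
          (rm.1, rm.2.insert (i * (t.length + 1) + j) rm.1).1 = pvLev s t i j ∧
            pvMemOK s t (rm.1, rm.2.insert (i * (t.length + 1) + j) rm.1).2 := by
        intro rm h1 h2
        refine ⟨h1, ?_⟩
        intro a b r hb hr
        change (rm.2.insert (i * (t.length + 1) + j) rm.1).get? (a * (t.length + 1) + b) = some r at hr
        rcases eq_or_ne (a * (t.length + 1) + b) (i * (t.length + 1) + j) with he | hne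
        · rw [he, PySem.Dict.get?_insert_self] at hr
          cases hr
          -- the flat key determines the cell: b = j and a = i
          have hm1 : (a * (t.length + 1) + b) % (t.length + 1) = b := by
            simp [Nat.mod_eq_of_lt (show b < t.length + 1 by omega)]
          have hm2 : (i * (t.length + 1) + j) % (t.length + 1) = j := by
            simp [Nat.mod_eq_of_lt (show j < t.length + 1 by omega)]
          rw [he] at hm1
          have hbj : b = j := by omega
          subst hbj
          have hai : a = i :=
            Nat.eq_of_mul_eq_mul_right (by omega) (Nat.add_right_cancel he)
          rw [hai]
          exact h1
        · rw [PySem.Dict.get?_insert, if_neg hne] at hr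
          exact h2 a b r hb hr
      match i, j with
      | 0, j => exact step _ (by simp [pvLev]) hm
      | i + 1, 0 => exact step _ (by simp [pvLev]) hm
      | i + 1, j + 1 =>
        have e1 : ((i + 1 : Nat) : Int) - 1 = ((i : Nat) : Int) := by push_cast; ring
        have e2 : ((j + 1 : Nat) : Int) - 1 = ((j : Nat) : Int) := by push_cast; ring
        by_cases hc : s.getD i ' ' = t.getD j ' '
        · have hc' : s[i]?.getD ' ' = t[j]?.getD ' ' := hc
          have h0 := ih i j memo (by omega) (by omega) hm
          refine step _ ?_ ?_
          · simp only [if_neg (Nat.succ_ne_zero i), if_neg (Nat.succ_ne_zero j), e1, e2,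
              PySem.List.pyGetD_natCast, if_pos hc, Nat.add_sub_cancel]
            rw [h0.1]
            simp [pvLev, hc']
          · simp only [if_neg (Nat.succ_ne_zero i), if_neg (Nat.succ_ne_zero j), e1, e2,
              PySem.List.pyGetD_natCast, if_pos hc, Nat.add_sub_cancel]
            exact h0.2
        · have hc' : ¬ s[i]?.getD ' ' = t[j]?.getD ' ' := hc
          have h1 := ih i j memo (by omega) (by omega) hm
          have h2 := ih i (j + 1) (pvEdB s t fuel i j memo).2 (by omega) (by omega) h1.2
          have h3 := ih (i + 1) j (pvEdB s t fuel i (j + 1) (pvEdB s t fuel i j memo).2).2 (by omega) (by omega) h2.2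
          refine step _ ?_ ?_
          · simp only [if_neg (Nat.succ_ne_zero i), if_neg (Nat.succ_ne_zero j), e1, e2,
              PySem.List.pyGetD_natCast, if_neg hc, Nat.add_sub_cancel]
            rw [h1.1, h2.1, h3.1]
            simp [pvLev, hc']
          · simp only [if_neg (Nat.succ_ne_zero i), if_neg (Nat.succ_ne_zero j), e1, e2,
              PySem.List.pyGetD_natCast, if_neg hc, Nat.add_sub_cancel]
            exact h3.2

theorem pvEditDistB_eq (s1 s2 : String) :
    pvEditDistB s1 s2 = pvLev s1.toList s2.toList s1.toList.length s2.toList.length := by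
  have h := pvEdB_correct s1.toList s2.toList (s1.toList.length + s2.toList.length + 1)
      s1.toList.length s2.toList.length PySem.Dict.empty (by omega) (by omega)
      (by intro i j r _ hr; simp [PySem.Dict.get?_empty] at hr)
  exact h.1

-- A's inner loop builds the next DP row (invariant over the tail of l1 being scanned).
theorem pvInnerRow (l1 l2 : List Char) (k : Nat) (hk : k < l2.length) :
    ∀ (l : List Char) (s : Nat), l1.drop s = l → s ≤ l1.length →
    (PySem.List.enumerate l (s : Int)).foldl (fun ds (jc : Int × Char) =>
        if jc.2 = l2[k] then ds ++ [PySem.List.pyGetD ((List.range (l1.length + 1)).map (fun i => pvLev l1 l2 i k)) jc.1 0]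
        else ds ++ [1 + min (PySem.List.pyGetD ((List.range (l1.length + 1)).map (fun i => pvLev l1 l2 i k)) jc.1 0)
                      (min (PySem.List.pyGetD ((List.range (l1.length + 1)).map (fun i => pvLev l1 l2 i k)) (jc.1 + 1) 0)
                           (PySem.List.pyGetD ds (-1) 0))])
      ((List.range (s + 1)).map (fun i => pvLev l1 l2 i (k + 1)))
    = (List.range (l1.length + 1)).map (fun i => pvLev l1 l2 i (k + 1)) := by
  intro l
  induction l with
  | nil =>
    intro s hdrop hs
    have hlen := congrArg List.length hdrop
    simp only [List.length_drop, List.length_nil] at hlen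
    have : s = l1.length := by omega
    subst this
    rfl
  | cons c rest ihl =>
    intro s hdrop hs
    have hlen := congrArg List.length hdrop
    simp only [List.length_drop, List.length_cons] at hlen
    have hslt : s < l1.length := by omega
    have hdec := List.drop_eq_getElem_cons hslt
    rw [hdrop] at hdec
    injection hdec with hc hrest
    rw [PySem.List.enumerate_cons, List.foldl_cons]
    have hrow : ∀ (m : Nat), m ≤ l1.length →
        PySem.List.pyGetD ((List.range (l1.length + 1)).map (fun i => pvLev l1 l2 i k)) ((m : Nat) : Int) 0
          = pvLev l1 l2 m k := by
      intro m hm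
      rw [PySem.List.pyGetD_natCast, PySem.List.getD_map_range _ _ _ _ (by omega)]
    have hacclast : PySem.List.pyGetD ((List.range (s + 1)).map (fun i => pvLev l1 l2 i (k + 1))) (-1) 0
        = pvLev l1 l2 s (k + 1) := by
      rw [List.range_succ, List.map_append, List.map_cons, List.map_nil,
        PySem.List.pyGetD_neg_one_append_singleton]
    have hstep :
        (if c = l2[k] then
          ((List.range (s + 1)).map (fun i => pvLev l1 l2 i (k + 1))) ++
            [PySem.List.pyGetD ((List.range (l1.length + 1)).map (fun i => pvLev l1 l2 i k)) ((s : Int)) 0]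
        else
          ((List.range (s + 1)).map (fun i => pvLev l1 l2 i (k + 1))) ++
            [1 + min (PySem.List.pyGetD ((List.range (l1.length + 1)).map (fun i => pvLev l1 l2 i k)) ((s : Int)) 0)
              (min (PySem.List.pyGetD ((List.range (l1.length + 1)).map (fun i => pvLev l1 l2 i k)) ((s : Int) + 1) 0)
                (PySem.List.pyGetD ((List.range (s + 1)).map (fun i => pvLev l1 l2 i (k + 1))) (-1) 0))])
        = (List.range (s + 1 + 1)).map (fun i => pvLev l1 l2 i (k + 1)) := by
      have e1 : ((s : Int) + 1) = (((s + 1 : Nat)) : Int) := by push_cast; ring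
      have hgetc : l1[s] = l1.getD s ' ' := (List.getD_eq_getElem l1 ' ' hslt).symm
      have hget2 : l2[k] = l2.getD k ' ' := (List.getD_eq_getElem l2 ' ' hk).symm
      rw [List.range_succ (n := s + 1), List.map_append, List.map_cons, List.map_nil]
      rw [hrow s (by omega), e1, hrow (s + 1) (by omega), hacclast]
      by_cases hcc : c = l2[k]
      · rw [if_pos hcc]
        have : pvLev l1 l2 (s + 1) (k + 1) = pvLev l1 l2 s k := by
          rw [pvLev]
          rw [if_pos (by rw [← hgetc, ← hget2, ← hc]; exact hcc)]
        rw [this]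
      · rw [if_neg hcc]
        have : pvLev l1 l2 (s + 1) (k + 1)
            = 1 + min (pvLev l1 l2 s k) (min (pvLev l1 l2 s (k + 1)) (pvLev l1 l2 (s + 1) k)) := by
          rw [pvLev]
          rw [if_neg (by rw [← hgetc, ← hget2, ← hc]; exact hcc)]
        rw [this, min_comm (pvLev l1 l2 s (k + 1)) (pvLev l1 l2 (s + 1) k)]
    rw [hstep]
    have h2 := ihl (s + 1) hrest.symm (by omega)
    rw [← h2]
    norm_cast

-- A's outer loop: after consuming l2, the row is the pvLev row at j = l2.length.
theorem pvOuterRows (l1 l2 : List Char) :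
    ∀ (l : List Char) (j : Nat), l2.drop j = l → j ≤ l2.length →
    (PySem.List.enumerate l (j : Int)).foldl (fun distances (ic : Int × Char) =>
        (PySem.List.enumerate l1).foldl (fun ds (jc : Int × Char) =>
          if jc.2 = ic.2 then ds ++ [PySem.List.pyGetD distances jc.1 0]
          else ds ++ [1 + min (PySem.List.pyGetD distances jc.1 0)
                        (min (PySem.List.pyGetD distances (jc.1 + 1) 0)
                             (PySem.List.pyGetD ds (-1) 0))]) [ic.1 + 1])
      ((List.range (l1.length + 1)).map (fun i => pvLev l1 l2 i j))
    = (List.range (l1.length + 1)).map (fun i => pvLev l1 l2 i l2.length) := by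
  intro l
  induction l with
  | nil =>
    intro j hdrop hj
    have hlen := congrArg List.length hdrop
    simp only [List.length_drop, List.length_nil] at hlen
    have : j = l2.length := by omega
    subst this
    rfl
  | cons c rest ihl =>
    intro j hdrop hj
    have hlen := congrArg List.length hdrop
    simp only [List.length_drop, List.length_cons] at hlen
    have hjlt : j < l2.length := by omega
    have hdec := List.drop_eq_getElem_cons hjlt
    rw [hdrop] at hdec
    injection hdec with hc hrest
    rw [PySem.List.enumerate_cons, List.foldl_cons]
    have e0 : [(j : Int) + 1] = (List.range (0 + 1)).map (fun i => pvLev l1 l2 i (j + 1)) := by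
      have hz : pvLev l1 l2 0 (j + 1) = ((j : Int) + 1) := by rw [pvLev]; push_cast; ring
      simp [hz]
    have hcc : c = l2[j] := hc
    rw [hcc, e0]
    have hin := pvInnerRow l1 l2 j hjlt l1 0 rfl (by omega)
    rw [show ((0 : Nat) : Int) = (0 : Int) from rfl] at hin
    rw [hin]
    have h2 := ihl (j + 1) hrest.symm (by omega)
    rw [← h2]
    norm_cast

theorem pvLev_zero_right (l1 l2 : List Char) (k : Nat) : pvLev l1 l2 k 0 = (k : Int) := by
  cases k <;> simp [pvLev]

theorem pvRowZero (l1 l2 : List Char) :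
    PySem.List.pyRange 0 ((l1.length : Int) + 1) 1
      = (List.range (l1.length + 1)).map (fun i => pvLev l1 l2 i 0) := by
  rw [PySem.List.pyRange_one]
  have ht : (((l1.length : Int) + 1) - 0).toNat = l1.length + 1 := by omega
  rw [ht]
  apply List.map_congr_left
  intro k _
  rw [pvLev_zero_right]
  ring

theorem pvDistFull (l1 l2 : List Char) :
    PySem.List.pyGetD ((PySem.List.enumerate l2).foldl (fun distances (ic : Int × Char) =>
        (PySem.List.enumerate l1).foldl (fun ds (jc : Int × Char) =>
          if jc.2 = ic.2 then ds ++ [PySem.List.pyGetD distances jc.1 0]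
          else ds ++ [1 + min (PySem.List.pyGetD distances jc.1 0)
                        (min (PySem.List.pyGetD distances (jc.1 + 1) 0)
                             (PySem.List.pyGetD ds (-1) 0))]) [ic.1 + 1])
      (PySem.List.pyRange 0 ((l1.length : Int) + 1) 1)) (-1) 0
    = pvLev l1 l2 l1.length l2.length := by
  rw [pvRowZero l1 l2]
  have h := pvOuterRows l1 l2 l2 0 rfl (by omega)
  rw [show ((0 : Nat) : Int) = (0 : Int) from rfl] at h
  rw [h, List.range_succ, List.map_append, List.map_cons, List.map_nil,
    PySem.List.pyGetD_neg_one_append_singleton]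

theorem pvEditDistA_eq (s1 s2 : String) :
    pvEditDistA s1 s2 = pvLev s1.toList s2.toList s1.toList.length s2.toList.length := by
  unfold pvEditDistA
  by_cases hsw : PySem.Str.len s1 > PySem.Str.len s2
  · rw [if_pos hsw]
    exact (pvDistFull s2.toList s1.toList).trans
      (pvLev_comm s2.toList s1.toList (s1.toList.length + s2.toList.length)
        s2.toList.length s1.toList.length (by omega))
  · rw [if_neg hsw]
    exact pvDistFull s1.toList s2.toList

theorem pvEditDist_eq (s1 s2 : String) : pvEditDistA s1 s2 = pvEditDistB s1 s2 := by
  rw [pvEditDistA_eq, pvEditDistB_eq]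

-- ===== VERDICT (by name: the statement is the Claim_ definition above) =====
theorem get_closest_label_spec : Claim_equal_get_closest_label := by
  intro input_string label_names _
  unfold Spec_get_closest_label get_closest_label get_closest_label_alt
  have : ∀ (ls : List String) (st : Option Int × Option String),
      ls.foldl (fun (st : Option Int × Option String) label =>
        let distance := pvEditDistA input_string label
        let lt : Bool := match st.1 with | none => true | some m => distance < m
        if lt then (some distance, some label) else st) st
      = ls.foldl (fun (st : Option Int × Option String) label =>
        let d := pvEditDistB input_string label
        match st.1 with
        | none => (some d, some label)
        | some b => if d < b then (some d, some label) else st) st := by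
    intro ls
    induction ls with
    | nil => intro st; rfl
    | cons x xs ih =>
      intro st
      simp only [List.foldl_cons]
      rw [pvEditDist_eq input_string x]
      cases st.1 <;> simp <;> exact ih _
  rw [this]
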